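-- pv_equiv track=rewrite | github.com/splunk/addonfactory-ucc-generator | contrib/common/neptune/splunktalib/conf_manager/conf_endpoints.py | _format_stanza_name
-- ===== SOURCE A (Python) =====
-- def _format_stanza_name(name):
--     replaces = {
--         "/": "%2F",
--         " ": "%20",
--     }
--     for key in replaces:
--         name = name.replace(key, replaces[key])
--     return name
-- ===== SOURCE B (Python) =====
-- def _format_stanza_name(name):
--     out = []
--     for c in name:
--         if c == "/":
--             out.append("%2F")
--         elif c == " ":
--             out.append("%20")
--         else:
--             out.append(c)
--     return "".join(out)
-- ===== Notes on version B (the rewrite author's own statement) =====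
-- stated objective: alternative
-- what changed: Drops the substitution dict and the two sequential str.replace passes entirely: B does one explicit per-character loop with an if/elif chain appending the escape (or the character) to an accumulator list, joined once at the end.
import Mathlib
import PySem

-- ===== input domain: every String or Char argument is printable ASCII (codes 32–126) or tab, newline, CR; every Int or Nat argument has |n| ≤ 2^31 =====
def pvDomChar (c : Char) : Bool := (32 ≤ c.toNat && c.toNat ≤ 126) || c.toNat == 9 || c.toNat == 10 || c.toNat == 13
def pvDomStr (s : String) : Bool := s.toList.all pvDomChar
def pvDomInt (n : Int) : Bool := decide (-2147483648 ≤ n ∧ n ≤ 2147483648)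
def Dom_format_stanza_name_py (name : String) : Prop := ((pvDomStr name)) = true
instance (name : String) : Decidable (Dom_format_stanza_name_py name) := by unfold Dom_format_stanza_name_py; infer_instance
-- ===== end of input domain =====

-- B drops the substitution dict and the two sequential str.replace passes: one explicit
-- per-character loop with an if/elif chain appending to an accumulator, joined once at
-- the end (objective: alternative; same value on all inputs).

-- ===== PORT A =====
-- the 'replaces' dict literal of A
def pvReplacesA : PySem.Dict String String :=
  ((PySem.Dict.empty).insert "/" "%2F").insert " " "%20"

def format_stanza_name_py (name : String) : String :=
  -- 'for key in replaces: name = name.replace(key, replaces[key])'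
  -- (key ∈ keys, so the lookup always succeeds; "" is an unreachable default)
  (PySem.Dict.keys pvReplacesA).foldl
    (fun n key => PySem.Str.replace n key (PySem.Dict.getD pvReplacesA key "")) name

-- ===== PORT B =====
def format_stanza_name_py_alt (name : String) : String :=
  -- 'out = []; for c in name: if c == "/": out.append("%2F") elif … ; return "".join(out)'
  PySem.Str.join ""
    (name.toList.foldl (fun out c =>
      if c = '/' then out ++ ["%2F"]
      else if c = ' ' then out ++ ["%20"]
      else out ++ [String.ofList [c]]) [])

-- ===== PRECONDITION & SPEC =====
def Spec_format_stanza_name_py (name : String) (out : String) : Prop := out = format_stanza_name_py_alt name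
instance (name : String) (out : String) : Decidable (Spec_format_stanza_name_py name out) := by unfold Spec_format_stanza_name_py; infer_instance

-- ===== CLAIM (what is proved, stated in full; the proofs are below) =====
def Claim_equal_format_stanza_name_py : Prop := ∀ (name : String), Dom_format_stanza_name_py name → Spec_format_stanza_name_py name (format_stanza_name_py name)

-- ===== LEMMAS AND PROOFS =====

-- per-character expansion both sides reduce to
def pvExpand (c : Char) : List Char :=
  if c = '/' then ['%', '2', 'F'] else if c = ' ' then ['%', '2', '0'] else [c]

-- the string piece B appends for a character
def pvPiece (c : Char) : String :=
  if c = '/' then "%2F" else if c = ' ' then "%20" else String.ofList [c]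

-- Chars.replace with a single-character pattern is a flatMap
lemma replace_go_single (a : Char) (new : List Char) :
    ∀ (l : List Char) (fuel : Nat) (acc : List Char), l.length ≤ fuel →
      PySem.Chars.replace.go [a] new fuel l acc
        = acc.reverse ++ l.flatMap (fun c => if c = a then new else [c]) := by
  intro l
  induction l with
  | nil =>
      intro fuel acc _
      cases fuel <;> simp [PySem.Chars.replace.go]
  | cons c t ih =>
      intro fuel acc hle
      cases fuel with
      | zero => simp at hle
      | succ fuel =>
        simp only [PySem.Chars.replace.go, List.isPrefixOf, List.flatMap_cons]
        by_cases h : c = a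
        · subst h
          simp only [BEq.rfl, Bool.true_and, if_pos trivial, List.length_cons, List.drop_succ_cons,
            List.length_nil, List.drop_zero]
          rw [ih _ _ (by simpa using Nat.le_of_succ_le_succ hle)]
          simp
        · have hb : (a == c) = false := by simp; exact fun hh => h hh.symm
          simp only [hb, Bool.false_and, if_neg (by decide : ¬ (false = true)), if_neg h]
          rw [ih _ _ (by simpa using Nat.le_of_succ_le_succ hle)]
          simp

lemma replace_single (a : Char) (new s : List Char) :
    PySem.Chars.replace s [a] new = s.flatMap (fun c => if c = a then new else [c]) := by
  simp only [PySem.Chars.replace, List.isEmpty]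
  rw [replace_go_single a new s s.length [] (le_refl _)]
  simp

-- composing A's two single-char replacements gives pvExpand
lemma two_replaces_eq_flatMap (s : List Char) :
    PySem.Chars.replace (PySem.Chars.replace s ['/'] ['%', '2', 'F']) [' '] ['%', '2', '0']
      = s.flatMap pvExpand := by
  rw [replace_single, replace_single, List.flatMap_assoc]
  apply List.flatMap_congr
  intro c _
  by_cases h1 : c = '/'
  · subst h1; decide
  · by_cases h2 : c = ' '
    · subst h2; decide
    · simp [pvExpand, h1, h2]

-- joining on "" is flattening
lemma join_nil_flatten (parts : List (List Char)) :
    PySem.Chars.join [] parts = parts.flatten := by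
  induction parts with
  | nil => simp [PySem.Chars.join_nil]
  | cons p rest ih =>
      cases rest with
      | nil => simp [PySem.Chars.join, List.intercalate]
      | cons q r => rw [PySem.Chars.join_cons_cons, ih]; simp

-- B's if/elif loop body appends exactly one pvPiece
lemma alt_body_eq (out : List String) (c : Char) :
    (if c = '/' then out ++ ["%2F"]
     else if c = ' ' then out ++ ["%20"]
     else out ++ [String.ofList [c]]) = out ++ [pvPiece c] := by
  unfold pvPiece; split_ifs <;> rfl

lemma piece_toList (c : Char) : (pvPiece c).toList = pvExpand c := by
  unfold pvPiece pvExpand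
  split_ifs with h1 h2 <;> first | decide | simp [String.toList_ofList]

-- ===== VERDICT (by name: the statement is the Claim_ definition above) =====
theorem format_stanza_name_py_spec : Claim_equal_format_stanza_name_py := by
  intro name _
  unfold Spec_format_stanza_name_py format_stanza_name_py format_stanza_name_py_alt
  have hA : (PySem.Dict.keys pvReplacesA).foldl
      (fun n key => PySem.Str.replace n key (PySem.Dict.getD pvReplacesA key "")) name
      = PySem.Str.replace (PySem.Str.replace name "/" "%2F") " " "%20" := rfl
  rw [hA]
  have hB : (name.toList.foldl (fun out c =>
      if c = '/' then out ++ ["%2F"]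
      else if c = ' ' then out ++ ["%20"]
      else out ++ [String.ofList [c]]) []) = name.toList.map pvPiece := by
    have : (fun (out : List String) (c : Char) =>
        if c = '/' then out ++ ["%2F"]
        else if c = ' ' then out ++ ["%20"]
        else out ++ [String.ofList [c]]) = fun out c => out ++ [pvPiece c] := by
      funext out c; exact alt_body_eq out c
    rw [this, PySem.List.foldl_append_singleton_eq_map]
    simp
  rw [hB]
  apply String.toList_injective
  rw [PySem.Str.toList_replace, PySem.Str.toList_replace, PySem.Str.toList_join]
  show PySem.Chars.replace (PySem.Chars.replace name.toList ['/'] ['%','2','F'])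
        [' '] ['%','2','0'] = _
  have hnil : ("" : String).toList = ([] : List Char) := rfl
  rw [two_replaces_eq_flatMap, hnil, join_nil_flatten, List.map_map, List.flatMap_def]
  congr 1
  apply List.map_congr_left
  intro c _
  simp only [Function.comp]
  exact (piece_toList c).symm
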